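-- pv_equiv track=rewrite | github.com/mabo1215/BodhiPromptShield | src/experiments/adversarial_robustness_suite.py | _find_literal_spans
-- ===== SOURCE A (Python) =====
-- def _find_literal_spans(text: str, literal: str) -> list[tuple[int, int]]:
--     spans: list[tuple[int, int]] = []
--     search_start = 0
--     while True:
--         offset = text.find(literal, search_start)
--         if offset == -1:
--             break
--         spans.append((offset, offset + len(literal)))
--         search_start = offset + len(literal)
--     return spans
-- ===== SOURCE B (Python) =====
-- def _find_literal_spans(text: str, literal: str) -> list[tuple[int, int]]:
--     m = len(literal)
--     # stage 1: every (possibly overlapping) occurrence position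
--     occurrences = [i for i in range(len(text) - m + 1) if text[i:i + m] == literal]
--     # stage 2: greedy left-to-right selection of non-overlapping occurrences
--     spans: list[tuple[int, int]] = []
--     last_end = 0
--     for i in occurrences:
--         if i >= last_end:
--             spans.append((i, i + m))
--             last_end = i + m
--     return spans
-- ===== Notes on version B (the rewrite author's own statement) =====
-- stated objective: alternative
-- what changed: Replaces A's single find-and-jump loop by a two-stage algorithm: first enumerate ALL (including overlapping) occurrence positions by slice comparison over every index, then a separate greedy pass keeps each occurrence that starts at or after the last kept end; the greedy selection over all occurrences provably yields the same leftmost non-overlapping spans.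
import Mathlib
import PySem

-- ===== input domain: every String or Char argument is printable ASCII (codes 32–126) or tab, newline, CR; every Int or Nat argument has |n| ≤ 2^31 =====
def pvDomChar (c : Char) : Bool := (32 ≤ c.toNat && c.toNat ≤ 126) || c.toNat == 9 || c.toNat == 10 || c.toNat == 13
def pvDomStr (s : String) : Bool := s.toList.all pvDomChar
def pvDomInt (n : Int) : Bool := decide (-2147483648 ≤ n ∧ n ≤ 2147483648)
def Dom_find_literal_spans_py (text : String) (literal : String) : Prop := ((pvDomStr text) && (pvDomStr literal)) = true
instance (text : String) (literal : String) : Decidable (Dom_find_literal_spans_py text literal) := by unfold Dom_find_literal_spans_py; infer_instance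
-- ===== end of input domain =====

-- B replaces A's find-and-jump loop by a two-stage algorithm: enumerate all
-- (possibly overlapping) occurrence positions, then greedily keep the
-- non-overlapping ones (alternative decomposition, similar cost).

-- ===== PORT A =====
-- A's 'while True' loop: each iteration moves search_start forward by at least 1
-- (literal nonempty under Pre_), so fuel = len(text) + 2 makes the same loop total;
-- within Pre_ the fuel is never exhausted and the port is exact.
def pvALoop (text lit : List Char) (spans : List (Int × Int)) (searchStart : Int) : Nat → List (Int × Int)
  | 0 => spans
  | fuel + 1 =>
    let offset := PySem.Chars.findFrom text lit searchStart
    if offset = -1 then spans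
    else pvALoop text lit (spans ++ [(offset, offset + lit.length)]) (offset + lit.length) fuel

def find_literal_spans_py (text : String) (literal : String) : List (Int × Int) :=
  pvALoop text.toList literal.toList [] 0 (text.toList.length + 2)

-- ===== PORT B =====
-- stage 1: '[i for i in range(len(text) - m + 1) if text[i:i+m] == literal]'
def pvOccs (s lit : List Char) : List Int :=
  (PySem.List.pyRange 0 ((s.length : Int) - lit.length + 1) 1).filter
    (fun i => PySem.List.slice s (some i) (some (i + lit.length)) == lit)

-- stage 2: the greedy 'for i in occurrences' body carrying (spans, last_end)
def pvGreedyStep (m : Int) (st : List (Int × Int) × Int) (i : Int) : List (Int × Int) × Int :=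
  if st.2 ≤ i then (st.1 ++ [(i, i + m)], i + m) else st

def find_literal_spans_py_alt (text : String) (literal : String) : List (Int × Int) :=
  ((pvOccs text.toList literal.toList).foldl
    (pvGreedyStep (literal.toList.length : Int)) ([], 0)).1

-- ===== PRECONDITION & SPEC =====
-- Pre_ excludes only literal = "", on which Python A (text.find("", k) = k, then
-- search_start += 0) loops forever and returns nothing; B returns a value there.
def Pre_find_literal_spans_py (text : String) (literal : String) : Prop := literal ≠ ""
instance (text : String) (literal : String) : Decidable (Pre_find_literal_spans_py text literal) := by unfold Pre_find_literal_spans_py; infer_instance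

def pvWitness_find_literal_spans_py : String × String := ("abcab", "ab")

def Spec_find_literal_spans_py (text : String) (literal : String) (out : List (Int × Int)) : Prop := out = find_literal_spans_py_alt text literal
instance (text : String) (literal : String) (out : List (Int × Int)) : Decidable (Spec_find_literal_spans_py text literal out) := by unfold Spec_find_literal_spans_py; infer_instance

-- ===== CLAIM (what is proved, stated in full; the proofs are below) =====
def Claim_equal_find_literal_spans_py : Prop := ∀ (text : String) (literal : String), Dom_find_literal_spans_py text literal → Pre_find_literal_spans_py text literal → Spec_find_literal_spans_py text literal (find_literal_spans_py text literal)

-- ===== LEMMAS AND PROOFS =====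

-- proof-side Nat version of stage 1
def pvOccsN (s lit : List Char) : List Nat :=
  (List.range (s.length + 1 - lit.length)).filter (fun i => decide (lit <+: s.drop i))

-- proof-side recursion computing stage 2's spans directly
def pvGreedyRun (m : Nat) : Nat → List Nat → List (Int × Int)
  | _, [] => []
  | le, i :: r =>
    if le ≤ i then ((i : Int), (i : Int) + (m : Int)) :: pvGreedyRun m (i + m) r
    else pvGreedyRun m le r

lemma pvOccs_bridge (s lit : List Char) :
    pvOccs s lit = (pvOccsN s lit).map (fun k : Nat => (k : Int)) := by
  unfold pvOccs pvOccsN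
  rw [PySem.List.pyRange_one]
  have hN : (((s.length : Int) - lit.length + 1) - 0).toNat = s.length + 1 - lit.length := by
    omega
  rw [hN, List.filter_map]
  simp only [Function.comp_def, zero_add]
  congr 1
  apply List.filter_congr
  intro k _
  rw [PySem.List.slice_natCast_add]
  rw [Bool.eq_iff_iff]
  simp only [beq_iff_eq, decide_eq_true_eq]
  constructor
  · intro h
    rw [List.prefix_iff_eq_take]
    exact h.symm
  · intro h
    rw [List.prefix_iff_eq_take] at h
    exact h.symm

lemma pvGreedy_foldl (m : Nat) :
    ∀ (l : List Nat) (le : Nat) (acc : List (Int × Int)),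
    ((l.map (fun k : Nat => (k : Int))).foldl (pvGreedyStep (m : Int)) (acc, (le : Int))).1
      = acc ++ pvGreedyRun m le l := by
  intro l
  induction l with
  | nil => intro le acc; simp [pvGreedyRun]
  | cons i r ih =>
    intro le acc
    simp only [List.map_cons, List.foldl_cons, pvGreedyStep]
    by_cases h : le ≤ i
    · rw [if_pos (by exact_mod_cast h)]
      have hc : ((i : Int) + (m : Int)) = (((i + m : Nat)) : Int) := by push_cast; ring
      rw [pvGreedyRun, if_pos h, hc, ih (i + m) (acc ++ [((i : Int), ((i + m : Nat) : Int))])]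
      simp
    · rw [if_neg (by exact_mod_cast h)]
      rw [ih le acc, pvGreedyRun, if_neg h]

-- greedy skips every occurrence below a lower bound of its running end
lemma pvGreedy_filter (m : Nat) :
    ∀ (l : List Nat) (le le' : Nat), le' ≤ le →
    pvGreedyRun m le l = pvGreedyRun m le (l.filter (fun i => decide (le' ≤ i))) := by
  intro l
  induction l with
  | nil => intro le le' _; rfl
  | cons i r ih =>
    intro le le' hle
    by_cases hi : le' ≤ i
    · rw [List.filter_cons_of_pos (by simpa using hi)]
      rw [pvGreedyRun, pvGreedyRun]
      by_cases h : le ≤ i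
      · rw [if_pos h, if_pos h, ih (i + m) le' (by omega)]
      · rw [if_neg h, if_neg h, ih le le' hle]
    · rw [List.filter_cons_of_neg (by simpa using hi)]
      rw [pvGreedyRun, if_neg (by omega)]
      exact ih le le' hle

lemma pvFilter_range_split (N j' : Nat) (Q : Nat → Bool) (hj : j' < N) (hQ : Q j' = true)
    (hlow : ∀ i, i < j' → Q i = false) :
    (List.range N).filter Q
      = j' :: (List.range N).filter (fun i => decide (j' + 1 ≤ i) && Q i) := by
  have hsplit : List.range N = List.range j' ++ List.range' j' (N - j') := by
    have h := @List.range'_append 0 j' (N - j') 1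
    simp only [Nat.zero_add, Nat.one_mul] at h
    rw [List.range_eq_range', show N = j' + (N - j') from by omega, ← h, List.range_eq_range']
    have h2 : j' + (N - j') - j' = N - j' := by omega
    rw [h2]
  have htail : N - j' = (N - j' - 1) + 1 := by omega
  rw [hsplit, htail, List.range'_succ]
  rw [List.filter_append, List.filter_append]
  have h1 : (List.range j').filter Q = [] := by
    apply List.filter_eq_nil_iff.mpr
    intro i hi
    simp [hlow i (List.mem_range.mp hi)]
  have h1' : (List.range j').filter (fun i => decide (j' + 1 ≤ i) && Q i) = [] := by
    apply List.filter_eq_nil_iff.mpr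
    intro i hi
    simp [hlow i (List.mem_range.mp hi)]
  rw [h1, h1', List.nil_append, List.nil_append]
  rw [List.filter_cons_of_pos hQ, List.filter_cons_of_neg (by simp)]
  congr 1
  apply List.filter_congr
  intro i hi
  have : j' + 1 ≤ i := (List.mem_range'_1.mp hi).1
  simp [this]

-- members of pvOccsN are occurrence positions fitting in s
lemma pvOccsN_mem (s lit : List Char) (i : Nat) (h : i ∈ pvOccsN s lit) :
    lit <+: s.drop i := by
  unfold pvOccsN at h
  simpa using (List.mem_filter.mp h).2

-- the main loop invariant: A's loop from search_start j produces exactly the greedy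
-- selection over all occurrences ≥ j
lemma pvALoop_eq (s lit : List Char) (hlit : lit ≠ []) :
    ∀ (fuel j : Nat) (acc : List (Int × Int)), j ≤ s.length → s.length + 1 ≤ fuel + j →
    pvALoop s lit acc (j : Int) fuel
      = acc ++ pvGreedyRun lit.length j ((pvOccsN s lit).filter (fun i => decide (j ≤ i))) := by
  intro fuel
  induction fuel with
  | zero => intro j acc hj hf; exfalso; omega
  | succ fuel ih =>
    intro j acc hj hf
    have hm : 0 < lit.length := List.length_pos_iff.mpr hlit
    rw [pvALoop]
    simp only [PySem.Chars.findFrom_natCast s lit j hj]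
    by_cases hfind : PySem.Chars.find (s.drop j) lit = -1
    · rw [if_pos (by simp [hfind])]
      have hnil : (pvOccsN s lit).filter (fun i => decide (j ≤ i)) = [] := by
        apply List.filter_eq_nil_iff.mpr
        intro i hi
        simp only [decide_eq_true_eq]
        intro hji
        have hpre : lit <+: s.drop i := pvOccsN_mem s lit i hi
        have : lit <:+: s.drop j := by
          have hdd : s.drop i = (s.drop j).drop (i - j) := by
            rw [List.drop_drop]
            congr 1
            omega
          rw [hdd] at hpre
          exact hpre.isInfix.trans (List.drop_suffix _ _).isInfix
        exact (PySem.Chars.find_eq_neg_one_iff _ _).mp hfind this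
      rw [hnil]
      simp [pvGreedyRun]
    · set f : Int := PySem.Chars.find (s.drop j) lit with hfdef
      have hf0 : 0 ≤ f := by have := PySem.Chars.neg_one_le_find (s.drop j) lit; omega
      rw [if_neg hfind, if_neg (by omega)]
      obtain ⟨hpre, hmin⟩ := PySem.Chars.find_spec (s := s.drop j) (sub := lit) hf0
      rw [← hfdef] at hpre hmin
      set j' : Nat := j + f.toNat with hjdef
      have hjpre : lit <+: s.drop j' := by
        rw [List.drop_drop] at hpre
        rw [hjdef]
        exact hpre
      have hflen : f ≤ (s.drop j).length := by
        have := PySem.Chars.find_le_length (s.drop j) lit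
        omega
      have hj'le : j' ≤ s.length := by
        simp only [List.length_drop] at hflen
        omega
      have hj'm : j' + lit.length ≤ s.length := by
        have := hjpre.length_le
        simp only [List.length_drop] at this
        omega
      have hnone : ∀ i, j ≤ i → i < j' → ¬ lit <+: s.drop i := by
        intro i h1 h2 hp
        have hdd : s.drop i = (s.drop j).drop (i - j) := by
          rw [List.drop_drop]; congr 1; omega
        rw [hdd] at hp
        exact hmin (i - j) (by omega) hp
      -- split the filtered occurrence list at its least element j'
      have hsplitocc :
          (pvOccsN s lit).filter (fun i => decide (j ≤ i))
            = j' :: ((pvOccsN s lit).filter (fun i => decide (j ≤ i))).filter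
                (fun i => decide (j' + 1 ≤ i)) := by
        unfold pvOccsN
        conv_lhs => rw [List.filter_filter]
        rw [pvFilter_range_split (s.length + 1 - lit.length) j'
          (fun i => decide (j ≤ i) && decide (lit <+: s.drop i))
          (by omega) (by simp only [Bool.and_eq_true, decide_eq_true_eq]; exact ⟨by omega, hjpre⟩)
          (by
            intro i hi
            by_cases hji : j ≤ i
            · simp [hnone i hji hi]
            · simp [hji])]
        congr 1
        rw [List.filter_filter, List.filter_filter]
        simp only [Bool.and_assoc]
      -- the tail, further filtered at j' + m, is the canonical occurrence list ≥ j' + m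
      have htail :
          (((pvOccsN s lit).filter (fun i => decide (j ≤ i))).filter
              (fun i => decide (j' + 1 ≤ i))).filter
            (fun i => decide (j' + lit.length ≤ i))
            = (pvOccsN s lit).filter (fun i => decide (j' + lit.length ≤ i)) := by
        rw [List.filter_filter, List.filter_filter]
        apply List.filter_congr
        intro i _
        by_cases hge : j' + lit.length ≤ i
        · have h1 : j ≤ i := by omega
          have h2 : j' + 1 ≤ i := by omega
          simp [h1, h2, hge]
        · simp [hge]
      have hcast : (j : Int) + f = ((j' : Nat) : Int) := by
        rw [hjdef]
        push_cast [Int.toNat_of_nonneg hf0]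
        ring
      rw [hcast]
      have step := ih (j' + lit.length)
        (acc ++ [((j' : Int), (j' : Int) + lit.length)]) hj'm (by omega)
      push_cast at step
      rw [step]
      conv_rhs => rw [hsplitocc, pvGreedyRun, if_pos (by omega : j ≤ j'),
        pvGreedy_filter lit.length _ (j' + lit.length) (j' + lit.length) le_rfl, htail]
      simp

-- ===== VERDICT (by name: the statement is the Claim_ definition above) =====
theorem find_literal_spans_py_spec : Claim_equal_find_literal_spans_py := by
  intro text literal _ hpre
  unfold Spec_find_literal_spans_py find_literal_spans_py find_literal_spans_py_alt
  have hlit : literal.toList ≠ [] := by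
    intro h
    exact hpre (by simpa using congrArg String.ofList h)
  rw [pvOccs_bridge, show (0 : Int) = ((0 : Nat) : Int) from rfl,
    pvGreedy_foldl literal.toList.length (pvOccsN text.toList literal.toList) 0 []]
  have hfilt : (pvOccsN text.toList literal.toList).filter (fun i => decide (0 ≤ i))
      = pvOccsN text.toList literal.toList := by
    apply List.filter_eq_self.mpr
    intro i _
    simp
  have := pvALoop_eq text.toList literal.toList hlit (text.toList.length + 2) 0 []
    (by omega) (by omega)
  rw [hfilt] at this
  simpa using this
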